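-- pv_equiv track=rewrite | github.com/raiymbek2048/phantom | backend/app/core/attack_router.py | get_priority_vulns
-- ===== SOURCE A (Python) =====
-- def get_attack_plan(context: dict) -> list[dict]:
--     """Return the attack plan from context, or an empty list."""
--     return context.get("attack_plan", [])
--
-- def get_priority_vulns(context: dict) -> list[str]:
--     """Aggregate priority_vulns from all technology-specific actions."""
--     plan = get_attack_plan(context)
--     vulns: list[str] = []
--     seen: set[str] = set()
--     for a in plan:
--         for v in a.get("params", {}).get("priority_vulns", []):
--             if v not in seen:
--                 seen.add(v)
--                 vulns.append(v)
--     return vulns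
-- ===== SOURCE B (Python) =====
-- def get_attack_plan(context: dict) -> list[dict]:
--     """Return the attack plan from context, or an empty list."""
--     return context.get("attack_plan", [])
--
-- def get_priority_vulns(context: dict) -> list[str]:
--     """Aggregate priority_vulns from all technology-specific actions."""
--     all_vulns = [v
--                  for a in get_attack_plan(context)
--                  for v in a.get("params", {}).get("priority_vulns", [])]
--     first_pos = {}
--     for i, v in reversed(list(enumerate(all_vulns))):
--         first_pos[v] = i
--     return [v for v, _ in sorted(first_pos.items(), key=lambda kv: kv[1])]
-- ===== Notes on version B (the rewrite author's own statement) =====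
-- stated objective: alternative
-- what changed: Replaces A's forward pass with a seen-set and membership branch by a different algorithm: flatten once, then a backward overwrite scan over reversed(enumerate(...)) builds a value-to-first-index dict with no membership test, and the result is the dict's items sorted by that index.
import Mathlib
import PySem

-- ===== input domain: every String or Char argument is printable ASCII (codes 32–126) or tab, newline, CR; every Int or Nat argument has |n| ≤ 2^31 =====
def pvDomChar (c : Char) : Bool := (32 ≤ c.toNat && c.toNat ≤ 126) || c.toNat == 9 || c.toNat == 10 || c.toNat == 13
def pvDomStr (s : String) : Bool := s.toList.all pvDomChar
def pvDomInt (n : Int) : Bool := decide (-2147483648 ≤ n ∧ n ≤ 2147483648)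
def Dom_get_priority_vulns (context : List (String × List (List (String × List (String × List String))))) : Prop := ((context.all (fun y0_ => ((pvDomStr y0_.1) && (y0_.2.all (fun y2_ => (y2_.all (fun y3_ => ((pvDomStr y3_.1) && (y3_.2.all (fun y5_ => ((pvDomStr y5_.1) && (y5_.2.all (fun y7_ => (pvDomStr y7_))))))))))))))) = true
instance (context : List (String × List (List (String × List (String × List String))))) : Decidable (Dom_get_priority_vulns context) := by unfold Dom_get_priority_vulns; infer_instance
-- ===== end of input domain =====

-- B replaces A's forward seen-set pass by a different algorithm: a backward overwrite scan that
-- builds a value→first-index map with no membership test, then sorts the map's items by index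
-- (alternative decomposition; same results, not claimed faster).

-- ===== PORT A =====
-- shared module helper (identical in both Pythons)
def get_attack_plan (context : List (String × List (List (String × List (String × List String))))) :
    List (List (String × List (String × List String))) :=
  (PySem.Dict.mk context).getD "attack_plan" []

def get_priority_vulns (context : List (String × List (List (String × List (String × List String))))) : List String :=
  let plan := get_attack_plan context
  (plan.foldl
    (fun (st : List String × PySem.Set String) a =>
      ((PySem.Dict.mk ((PySem.Dict.mk a).getD "params" [])).getD "priority_vulns" []).foldl
        (fun (st : List String × PySem.Set String) v =>
          if st.2.contains v then st else (st.1 ++ [v], st.2.add v))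
        st)
    ([], PySem.Set.empty)).1

-- ===== PORT B =====
def get_priority_vulns_alt (context : List (String × List (List (String × List (String × List String))))) : List String :=
  let all_vulns := (get_attack_plan context).flatMap
    (fun a => (PySem.Dict.mk ((PySem.Dict.mk a).getD "params" [])).getD "priority_vulns" [])
  let first_pos := ((PySem.List.enumerate all_vulns 0).reverse).foldl
    (fun (d : PySem.Dict String Int) p => d.insert p.2 p.1) PySem.Dict.empty
  (PySem.List.sorted first_pos.items (fun kv => kv.2) false).map (fun kv => kv.1)

-- ===== PRECONDITION & SPEC =====
-- Pre_ excludes only association lists that bind one of the consulted keys ("attack_plan",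
-- "params", "priority_vulns") more than once at its lookup site: such values never arise from a
-- Python dict (whose keys are unique), so no Python-reachable input is excluded.
def Pre_get_priority_vulns (context : List (String × List (List (String × List (String × List String))))) : Prop :=
  (context.map Prod.fst).count "attack_plan" ≤ 1 ∧
  ∀ kv ∈ context, ∀ a ∈ kv.2,
    (a.map Prod.fst).count "params" ≤ 1 ∧
    ∀ pkv ∈ a, (pkv.2.map Prod.fst).count "priority_vulns" ≤ 1
instance (context : List (String × List (List (String × List (String × List String))))) : Decidable (Pre_get_priority_vulns context) := by unfold Pre_get_priority_vulns; infer_instance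
def pvWitness_get_priority_vulns : (List (String × List (List (String × List (String × List String))))) :=
  [("attack_plan", [[("params", [("priority_vulns", ["sqli", "xss", "sqli"])])],
                    [("params", [("priority_vulns", ["rce", "xss"])])]])]
def Spec_get_priority_vulns (context : List (String × List (List (String × List (String × List String))))) (out : List String) : Prop := out = get_priority_vulns_alt context
instance (context : List (String × List (List (String × List (String × List String))))) (out : List String) : Decidable (Spec_get_priority_vulns context out) := by unfold Spec_get_priority_vulns; infer_instance

-- ===== CLAIM (what is proved, stated in full; the proofs are below) =====
def Claim_equal_get_priority_vulns : Prop := ∀ (context : List (String × List (List (String × List (String × List String))))), Dom_get_priority_vulns context → Pre_get_priority_vulns context → Spec_get_priority_vulns context (get_priority_vulns context)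

-- ===== LEMMAS AND PROOFS =====

-- A's inner loop from a doubled state is Set.update on both components.
theorem pv_inner (l : List String) (s : PySem.Set String) :
    l.foldl (fun (st : List String × PySem.Set String) v =>
        if st.2.contains v then st else (st.1 ++ [v], st.2.add v)) (s, s)
      = (PySem.Set.update s l, PySem.Set.update s l) := by
  induction l generalizing s with
  | nil => simp [PySem.Set.update]
  | cons v l ih =>
      by_cases hv : v ∈ s
      · simpa [hv, PySem.Set.update_cons, PySem.Set.add, PySem.Set.add_of_mem hv]
          using ih (PySem.Set.add s v)
      · simpa [hv, PySem.Set.update_cons, PySem.Set.add, PySem.Set.add_of_not_mem hv]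
          using ih (PySem.Set.add s v)

-- A's outer loop from a doubled state accumulates Set.update over the flattened vulns.
theorem pv_outer (plan : List (List (String × List (String × List String))))
    (g : List (String × List (String × List String)) → List String) (s : PySem.Set String) :
    plan.foldl
      (fun (st : List String × PySem.Set String) a =>
        (g a).foldl (fun (st : List String × PySem.Set String) v =>
          if st.2.contains v then st else (st.1 ++ [v], st.2.add v)) st) (s, s)
      = (PySem.Set.update s (plan.flatMap g), PySem.Set.update s (plan.flatMap g)) := by
  induction plan generalizing s with
  | nil => simp [PySem.Set.update]
  | cons a plan ih =>
      simp only [List.foldl_cons, pv_inner (g a) s]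
      rw [ih (PySem.Set.update s (g a))]
      simp [PySem.Set.update, List.flatMap_cons, List.foldl_append]

-- B's backward overwrite loop, read as a foldr over enumerate: the surviving value at key v
-- is the index of v's FIRST occurrence.
theorem pv_get?_foldr (xs : List String) (s : Int) (d0 : PySem.Dict String Int) (v : String) :
    ((PySem.List.enumerate xs s).foldr (fun p (d : PySem.Dict String Int) => d.insert p.2 p.1) d0).get? v
      = if v ∈ xs then some (s + (xs.idxOf v : Int)) else d0.get? v := by
  induction xs generalizing s with
  | nil => simp [PySem.List.enumerate_nil]
  | cons x t ih =>
      rw [PySem.List.enumerate_cons, List.foldr_cons, PySem.Dict.get?_insert, ih (s + 1)]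
      by_cases hvx : v = x
      · simp [hvx]
      · by_cases hvt : v ∈ t
        · simp only [hvx, if_false, hvt, List.mem_cons, or_true, if_pos,
            List.idxOf_cons_ne _ (by exact fun h => hvx h.symm)]
          congr 1
          push_cast
          ring
        · have : v ∉ x :: t := by simp [hvx, hvt]
          simp [hvx, hvt, this]

-- first-occurrence indices strictly increase along the deduplicated list.
theorem pv_dedup_pairwise_idxOf (xs : List String) :
    (PySem.List.dedup xs).Pairwise (fun a b => xs.idxOf a < xs.idxOf b) := by
  induction xs with
  | nil => simp
  | cons x t ih =>
      rw [PySem.List.dedup_eq_ofList, PySem.Set.ofList_cons]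
      constructor
      · intro y hy
        have hmem := (PySem.Set.mem_discard _ _ _).1 hy
        rw [List.idxOf_cons_self, List.idxOf_cons_ne _ (by exact fun h => hmem.2 h.symm)]
        omega
      · have hsub : List.Sublist (PySem.Set.discard (PySem.Set.ofList t) x) (PySem.Set.ofList t) := by
          simp only [PySem.Set.discard]
          exact List.filter_sublist
        have hp : (PySem.Set.discard (PySem.Set.ofList t) x).Pairwise
            (fun a b => t.idxOf a < t.idxOf b) :=
          List.Pairwise.sublist hsub (by simpa [PySem.List.dedup_eq_ofList] using ih)
        refine hp.imp_of_mem ?_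
        intro a b ha hb hlt
        have hax : a ≠ x := ((PySem.Set.mem_discard _ _ _).1 ha).2
        have hbx : b ≠ x := ((PySem.Set.mem_discard _ _ _).1 hb).2
        rw [List.idxOf_cons_ne _ (fun h => hax h.symm), List.idxOf_cons_ne _ (fun h => hbx h.symm)]
        omega

-- B's whole pipeline on the flattened list equals ordered dedup.
theorem pv_b_eq_dedup (xs : List String) :
    (PySem.List.sorted
        (((PySem.List.enumerate xs 0).reverse).foldl
          (fun (d : PySem.Dict String Int) p => d.insert p.2 p.1) PySem.Dict.empty).items
        (fun kv => kv.2) false).map (fun kv => kv.1)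
      = PySem.List.dedup xs := by
  set d := ((PySem.List.enumerate xs 0).reverse).foldl
      (fun (d : PySem.Dict String Int) p => d.insert p.2 p.1) PySem.Dict.empty with hd
  have hfoldr : d = (PySem.List.enumerate xs 0).foldr
      (fun p (d : PySem.Dict String Int) => d.insert p.2 p.1) PySem.Dict.empty := by
    rw [hd, List.foldl_reverse]
  have hget : ∀ v, d.get? v = if v ∈ xs then some ((xs.idxOf v : Int)) else none := by
    intro v
    rw [hfoldr, pv_get?_foldr xs 0 PySem.Dict.empty v]
    simp [PySem.Dict.get?_empty]
  have hnd : d.keys.Nodup := by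
    rw [hd]
    exact PySem.Dict.nodup_keys_foldl_insert_key
      (β := Int × String) ((PySem.List.enumerate xs 0).reverse)
      (fun p => p.2) (fun _ p => p.1) PySem.Dict.empty PySem.Dict.nodup_keys_empty
  have hmemk : ∀ v, v ∈ d.keys ↔ v ∈ xs := by
    intro v
    constructor
    · intro h
      by_contra hvx
      exact (PySem.Dict.get?_eq_none_iff_not_mem_keys d v).1 (by rw [hget v, if_neg hvx]) h
    · intro h
      by_contra hk
      have := (PySem.Dict.get?_eq_none_iff_not_mem_keys d v).2 hk
      rw [hget v, if_pos h] at this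
      simp at this
  have hperm : d.keys.Perm (PySem.List.dedup xs) := by
    rw [List.perm_ext_iff_of_nodup hnd (PySem.List.nodup_dedup xs)]
    intro v
    rw [hmemk v, PySem.List.mem_dedup]
  have hitems : d.items = d.keys.map (fun k => (k, d.getD k 0)) :=
    PySem.Dict.items_eq_map_keys d hnd 0
  have hitems' : d.items = d.keys.map (fun k => (k, (xs.idxOf k : Int))) := by
    rw [hitems]
    refine List.map_congr_left ?_
    intro k hk
    have hkxs : k ∈ xs := (hmemk k).1 hk
    rw [PySem.Dict.getD_eq_get?_getD, hget k, if_pos hkxs]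
    rfl
  have hpermP : ((PySem.List.dedup xs).map (fun k => (k, (xs.idxOf k : Int)))).Perm d.items := by
    rw [hitems']
    exact (hperm.map _).symm
  have hpair : ((PySem.List.dedup xs).map (fun k => (k, (xs.idxOf k : Int)))).Pairwise
      (fun a b => a.2 < b.2) := by
    rw [List.pairwise_map]
    refine (pv_dedup_pairwise_idxOf xs).imp ?_
    intro a b h
    have : (xs.idxOf a : Int) < xs.idxOf b := by exact_mod_cast h
    simpa using this
  rw [PySem.List.sorted_eq_of_perm_of_pairwise_lt _ _ _ hpermP hpair]
  simp [Function.comp_def]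

-- ===== VERDICT (by name: the statement is the Claim_ definition above) =====
theorem get_priority_vulns_spec : Claim_equal_get_priority_vulns := by
  intro context _ _
  unfold Spec_get_priority_vulns get_priority_vulns get_priority_vulns_alt
  show (List.foldl _ ((PySem.Set.empty : PySem.Set String), (PySem.Set.empty : PySem.Set String)) _).1 = _
  rw [pv_outer (get_attack_plan context)
    (fun a => (PySem.Dict.mk ((PySem.Dict.mk a).getD "params" [])).getD "priority_vulns" [])
    PySem.Set.empty]
  rw [pv_b_eq_dedup]
  simp [PySem.Set.empty, PySem.Set.update_nil_left]
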